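-- pv_equiv track=rewrite | github.com/Thomasevers2517/ML-Research-Template | TEMPLATE/src/models/euclidean/base/Treensformer/Treensformer.py | build_ancestor_map
-- ===== SOURCE A (Python) =====
-- def build_ancestor_map(parent_map, all_nodes=None):
--     """
--     Given a dict `parent_map` of {child_node: parent_node, ...},
--     build a dict `ancestor_map` of:
--       node -> [parent, grandparent, ..., root]
--     If all_nodes is None, we infer it from parent_map keys and values.
--     """
--     if all_nodes is None:
--         # Infer all distinct node IDs from parent_map
--         # by collecting keys and values
--         unique_keys = set(parent_map.keys())
--         unique_vals = set(parent_map.values())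
--         all_nodes = unique_keys.union(unique_vals)
--     else:
--         all_nodes = set(all_nodes)
--
--     ancestor_map = {}
--     for node in all_nodes:
--         ancestors = []
--         current = node
--         while current in parent_map:  # climb until no more parent
--             p = parent_map[current]
--             ancestors.append(p)
--             current = p
--         ancestor_map[node] = ancestors
--
--     return ancestor_map
-- ===== SOURCE B (Python) =====
-- def build_ancestor_map(parent_map, all_nodes=None):
--     """
--     Memoized iterative rewrite: climb only until a node whose chain is already
--     known (or a root), then unwind the collected path once, filling the memo,
--     instead of re-climbing to the root independently for every node.
--     """
--     if all_nodes is None: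
--         nodes = set(parent_map.keys()) | set(parent_map.values())
--     else:
--         nodes = set(all_nodes)
--
--     memo = {}
--     result = {}
--     for node in nodes:
--         path = []
--         cur = node
--         while cur not in memo and cur in parent_map:
--             p = parent_map[cur]
--             path.append((cur, p))
--             cur = p
--         tail = memo.get(cur, [])
--         for x, p in reversed(path):
--             tail = [p] + tail
--             memo[x] = tail
--         result[node] = memo.get(node, [])
--     return result
-- ===== Notes on version B (the rewrite author's own statement) =====
-- stated objective: alternative
-- what changed: Instead of re-climbing the parent chain to the root independently for every node, B memoizes ancestor chains: the climb stops at the first node whose chain is already known (or at a root) and the collected path is unwound once to fill the memo, so each parent link is resolved via the memo rather than re-traversed per node.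
import Mathlib
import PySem

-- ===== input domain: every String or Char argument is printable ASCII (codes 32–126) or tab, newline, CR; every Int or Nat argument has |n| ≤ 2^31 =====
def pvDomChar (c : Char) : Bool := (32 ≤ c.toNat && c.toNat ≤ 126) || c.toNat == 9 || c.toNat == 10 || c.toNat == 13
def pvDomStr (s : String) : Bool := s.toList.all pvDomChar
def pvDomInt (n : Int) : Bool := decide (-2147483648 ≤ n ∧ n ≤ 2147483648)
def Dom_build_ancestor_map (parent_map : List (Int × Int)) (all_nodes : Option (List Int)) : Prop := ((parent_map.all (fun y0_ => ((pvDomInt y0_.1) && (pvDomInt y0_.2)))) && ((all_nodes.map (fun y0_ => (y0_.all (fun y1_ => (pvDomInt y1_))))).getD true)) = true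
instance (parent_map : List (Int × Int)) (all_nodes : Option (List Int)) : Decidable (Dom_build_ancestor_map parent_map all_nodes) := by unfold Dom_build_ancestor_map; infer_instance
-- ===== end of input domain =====

-- B memoizes ancestor chains (climb stops at an already-known node, then the collected
-- path is unwound once), instead of A's fresh climb to the root for every node.

-- ===== PORT A =====
-- the node set both Pythons compute identically: set(keys) | set(values), or set(all_nodes)
def pvNodes (parent_map : List (Int × Int)) (all_nodes : Option (List Int)) : PySem.Set Int :=
  match all_nodes with
  | none => PySem.Set.union (PySem.Set.ofList (PySem.Dict.ofList parent_map).keys)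
      (PySem.Dict.ofList parent_map).values
  | some l => PySem.Set.ofList l

-- A's while loop: climb parent links, appending each parent (fuel = |parent_map| is enough
-- on every input Pre_ admits; on a cycle the Python loops forever and Pre_ excludes it)
def pvChainA (d : PySem.Dict Int Int) : Nat → Int → List Int
  | 0, _ => []
  | fuel+1, cur =>
    match d.get? cur with
    | some p => p :: pvChainA d fuel p
    | none => []

def build_ancestor_map (parent_map : List (Int × Int)) (all_nodes : Option (List Int)) : List (Int × List Int) :=
  let d := PySem.Dict.ofList parent_map
  ((pvNodes parent_map all_nodes).foldl
    (fun acc n => acc.insert n (pvChainA d parent_map.length n)) PySem.Dict.empty).items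

-- ===== PORT B =====
-- B's while loop: climb while the node is unknown and has a parent, recording (node, parent)
def pvCollect (d : PySem.Dict Int Int) (memo : PySem.Dict Int (List Int)) :
    Nat → Int → List (Int × Int) → List (Int × Int) × Int
  | 0, cur, path => (path, cur)
  | fuel+1, cur, path =>
    if (memo.get? cur).isSome then (path, cur)
    else
      match d.get? cur with
      | some p => pvCollect d memo fuel p (path ++ [(cur, p)])
      | none => (path, cur)

-- B's unwind step: tail = [p] + tail; memo[x] = tail
def pvUnwindStep (tm : List Int × PySem.Dict Int (List Int)) (xp : Int × Int) :
    List Int × PySem.Dict Int (List Int) :=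
  let t := xp.2 :: tm.1
  (t, tm.2.insert xp.1 t)

-- one node of B's outer loop: collect the unknown path, then unwind it filling the memo
def pvProcess (d : PySem.Dict Int Int) (fuel : Nat) (memo : PySem.Dict Int (List Int)) (n : Int) :
    List Int × PySem.Dict Int (List Int) :=
  let pc := pvCollect d memo fuel n []
  pc.1.reverse.foldl pvUnwindStep (memo.getD pc.2 [], memo)

def build_ancestor_map_alt (parent_map : List (Int × Int)) (all_nodes : Option (List Int)) : List (Int × List Int) :=
  let d := PySem.Dict.ofList parent_map
  ((pvNodes parent_map all_nodes).foldl
    (fun acc n =>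
      let tm := pvProcess d parent_map.length acc.2 n
      (acc.1.insert n (tm.2.getD n []), tm.2))
    (PySem.Dict.empty, PySem.Dict.empty)).1.items

-- ===== PRECONDITION & SPEC =====
-- one parent-following step; a node without a parent is a fixed point
def pvStep (parent_map : List (Int × Int)) (x : Int) : Int :=
  ((PySem.Dict.ofList parent_map).get? x).getD x

-- the climb from n leaves the keys of parent_map within |parent_map| steps
def pvTerm (parent_map : List (Int × Int)) (n : Int) : Prop :=
  ∃ k ∈ List.range (parent_map.length + 1),
    (PySem.Dict.ofList parent_map).get? ((pvStep parent_map)^[k] n) = none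

-- Pre_ excludes exactly the inputs where some considered node's parent chain cycles:
-- there Python A's while loop never terminates (no value is returned).
def Pre_build_ancestor_map (parent_map : List (Int × Int)) (all_nodes : Option (List Int)) : Prop :=
  ∀ n ∈ pvNodes parent_map all_nodes, pvTerm parent_map n

instance (parent_map : List (Int × Int)) (all_nodes : Option (List Int)) : Decidable (Pre_build_ancestor_map parent_map all_nodes) := by
  unfold Pre_build_ancestor_map pvTerm; infer_instance

def pvWitness_build_ancestor_map : (List (Int × Int)) × Option (List Int) :=
  ([(1, 2), (2, 3), (4, 3)], none)

def Spec_build_ancestor_map (parent_map : List (Int × Int)) (all_nodes : Option (List Int)) (out : List (Int × List Int)) : Prop := out = build_ancestor_map_alt parent_map all_nodes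
instance (parent_map : List (Int × Int)) (all_nodes : Option (List Int)) (out : List (Int × List Int)) : Decidable (Spec_build_ancestor_map parent_map all_nodes out) := by unfold Spec_build_ancestor_map; infer_instance

-- ===== CLAIM (what is proved, stated in full; the proofs are below) =====
def Claim_equal_build_ancestor_map : Prop := ∀ (parent_map : List (Int × Int)) (all_nodes : Option (List Int)), Dom_build_ancestor_map parent_map all_nodes → Pre_build_ancestor_map parent_map all_nodes → Spec_build_ancestor_map parent_map all_nodes (build_ancestor_map parent_map all_nodes)

-- ===== LEMMAS AND PROOFS =====

-- chains do not depend on the fuel once it covers the exit point of the climb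
theorem pvChainA_stable (d : PySem.Dict Int Int) (pm : List (Int × Int))
    (hd : d = PySem.Dict.ofList pm) :
    ∀ (k : Nat) (n : Int) (f1 f2 : Nat),
      d.get? ((pvStep pm)^[k] n) = none → k ≤ f1 → k ≤ f2 →
      pvChainA d f1 n = pvChainA d f2 n := by
  intro k
  induction k with
  | zero =>
    intro n f1 f2 h _ _
    simp only [Function.iterate_zero, id] at h
    cases f1 <;> cases f2 <;> simp [pvChainA, h]
  | succ k ih =>
    intro n f1 f2 h h1 h2
    cases hn : d.get? n with
    | none => cases f1 <;> cases f2 <;> simp [pvChainA, hn]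
    | some p =>
      obtain ⟨f1', rfl⟩ : ∃ m, f1 = m + 1 := ⟨f1 - 1, by omega⟩
      obtain ⟨f2', rfl⟩ : ∃ m, f2 = m + 1 := ⟨f2 - 1, by omega⟩
      have hstep : pvStep pm n = p := by simp [pvStep, ← hd, hn]
      rw [Function.iterate_succ_apply, hstep] at h
      simp only [pvChainA, hn]
      exact congrArg (p :: ·) (ih p f1' f2' h (by omega) (by omega))

-- a node without a parent has the empty chain, whatever the fuel
theorem pvChainA_root (d : PySem.Dict Int Int) (n : Int) (f : Nat)
    (h : d.get? n = none) : pvChainA d f n = [] := by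
  cases f <;> simp [pvChainA, h]

-- unfolding the canonical chain one step
theorem pvChainA_unfold (d : PySem.Dict Int Int) (pm : List (Int × Int))
    (hd : d = PySem.Dict.ofList pm) (n p : Int) (k : Nat)
    (hn : d.get? n = some p)
    (h : d.get? ((pvStep pm)^[k + 1] n) = none) (hk : k + 1 ≤ pm.length) :
    pvChainA d pm.length n = p :: pvChainA d pm.length p := by
  obtain ⟨L', hL⟩ : ∃ m, pm.length = m + 1 := ⟨pm.length - 1, by omega⟩
  have hstep : pvStep pm n = p := by simp [pvStep, ← hd, hn]
  rw [Function.iterate_succ_apply, hstep] at h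
  rw [hL]
  simp only [pvChainA, hn]
  exact congrArg (p :: ·) (pvChainA_stable d pm hd k p L' (L' + 1) h (by omega) (by omega))

-- memo invariant: every stored chain is the canonical chain of a terminating node
def pvMemoOK (pm : List (Int × Int)) (memo : PySem.Dict Int (List Int)) : Prop :=
  ∀ x ch, memo.get? x = some ch →
    pvTerm pm x ∧ ch = pvChainA (PySem.Dict.ofList pm) pm.length x

-- the collected path only grows at the end: factor out the accumulator
theorem pvCollect_append (d : PySem.Dict Int Int) (memo : PySem.Dict Int (List Int)) :
    ∀ (f : Nat) (cur : Int) (path : List (Int × Int)),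
      pvCollect d memo f cur path =
        (path ++ (pvCollect d memo f cur []).1, (pvCollect d memo f cur []).2) := by
  intro f
  induction f with
  | zero => intro cur path; simp [pvCollect]
  | succ f ih =>
    intro cur path
    by_cases hm : (memo.get? cur).isSome
    · simp [pvCollect, hm]
    · cases hn : d.get? cur with
      | none => simp [pvCollect, hm, hn]
      | some p =>
        simp only [pvCollect, hm, if_neg, Bool.false_eq_true, not_false_iff, hn]
        rw [ih p (path ++ [(cur, p)]), ih p ([] ++ [(cur, p)])]
        simp

-- processing one node returns its canonical chain, stores it, and keeps the memo invariant
theorem pvProcess_spec (pm : List (Int × Int)) (d : PySem.Dict Int Int)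
    (hd : d = PySem.Dict.ofList pm) :
    ∀ (f : Nat) (cur : Int) (k : Nat) (memo : PySem.Dict Int (List Int)),
      pvMemoOK pm memo → k ≤ f → f ≤ pm.length →
      d.get? ((pvStep pm)^[k] cur) = none →
      (pvProcess d f memo cur).1 = pvChainA d pm.length cur ∧
      pvMemoOK pm (pvProcess d f memo cur).2 ∧
      (pvProcess d f memo cur).2.getD cur [] = pvChainA d pm.length cur := by
  intro f
  induction f with
  | zero =>
    intro cur k memo hok hkf _ h
    interval_cases k
    simp only [Function.iterate_zero, id] at h
    have hC : pvChainA d pm.length cur = [] := pvChainA_root d cur _ h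
    simp only [pvProcess, pvCollect, List.reverse_nil, List.foldl_nil]
    have hg : memo.getD cur [] = pvChainA d pm.length cur := by
      cases hm : memo.get? cur with
      | none => rw [PySem.Dict.getD_of_get?_eq_none memo [] hm, hC]
      | some ch => rw [PySem.Dict.getD_of_get?_eq_some memo [] hm, (hok cur ch hm).2, ← hd]
    exact ⟨hg, hok, hg⟩
  | succ f ih =>
    intro cur k memo hok hkf hfL h
    by_cases hm : (memo.get? cur).isSome
    · obtain ⟨ch, hch⟩ := Option.isSome_iff_exists.mp hm
      have hcc := (hok cur ch hch).2
      rw [← hd] at hcc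
      simp only [pvProcess, pvCollect, hm, if_true, List.reverse_nil, List.foldl_nil]
      refine ⟨?_, hok, ?_⟩
      · rw [PySem.Dict.getD_of_get?_eq_some memo [] hch]; exact hcc
      · rw [PySem.Dict.getD_of_get?_eq_some memo [] hch]; exact hcc
    · cases hn : d.get? cur with
      | none =>
        have hC : pvChainA d pm.length cur = [] := pvChainA_root d cur _ hn
        have hmn : memo.get? cur = none := Option.not_isSome_iff_eq_none.mp hm
        simp only [pvProcess, pvCollect, hm, hn, hC]
        exact ⟨PySem.Dict.getD_of_get?_eq_none memo [] hmn, hok,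
          PySem.Dict.getD_of_get?_eq_none memo [] hmn⟩
      | some p =>
        obtain ⟨k', rfl⟩ : ∃ m, k = m + 1 := by
          refine ⟨k - 1, ?_⟩
          rcases Nat.eq_zero_or_pos k with h0 | h0
          · subst h0; simp only [Function.iterate_zero, id] at h; rw [h] at hn; cases hn
          · omega
        have hstep : pvStep pm cur = p := by simp [pvStep, ← hd, hn]
        have hp : d.get? ((pvStep pm)^[k'] p) = none := by
          rwa [Function.iterate_succ_apply, hstep] at h
        have hcol : pvCollect d memo (f + 1) cur [] =
            ((cur, p) :: (pvCollect d memo f p []).1, (pvCollect d memo f p []).2) := by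
          simp only [pvCollect, hm, Bool.false_eq_true, if_false, hn, List.nil_append]
          rw [pvCollect_append d memo f p [(cur, p)]]
          simp
        have hproc : pvProcess d (f + 1) memo cur =
            pvUnwindStep (pvProcess d f memo p) (cur, p) := by
          simp only [pvProcess, hcol, List.reverse_cons, List.foldl_append, List.foldl_cons,
            List.foldl_nil]
        obtain ⟨ih1, ih2, _⟩ := ih p k' memo hok (by omega) (by omega) hp
        have hCcur : pvChainA d pm.length cur = p :: pvChainA d pm.length p :=
          pvChainA_unfold d pm hd cur p k' hn h (by omega)
        rw [hproc]
        cases hP : pvProcess d f memo p with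
        | mk P1 P2 =>
          rw [hP] at ih1 ih2
          simp only at ih1
          simp only [pvUnwindStep, ih1]
          refine ⟨hCcur.symm, ?_, ?_⟩
          · intro x ch hx
            rw [PySem.Dict.get?_insert] at hx
            by_cases hxc : x = cur
            · rw [if_pos hxc] at hx
              cases hx
              subst hxc
              refine ⟨⟨k' + 1, ?_, by rw [← hd]; exact h⟩, by rw [← hd]; exact hCcur.symm⟩
              rw [List.mem_range]; omega
            · rw [if_neg hxc] at hx
              exact ih2 x ch hx
          · rw [PySem.Dict.getD_insert_self]; exact hCcur.symm

-- the two outer folds agree: B's result dict is A's result dict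
theorem pvFold_spec (pm : List (Int × Int)) (d : PySem.Dict Int Int)
    (hd : d = PySem.Dict.ofList pm) :
    ∀ (ns : List Int) (res : PySem.Dict Int (List Int)) (memo : PySem.Dict Int (List Int)),
      pvMemoOK pm memo → (∀ n ∈ ns, pvTerm pm n) →
      (ns.foldl (fun acc n =>
          let tm := pvProcess d pm.length acc.2 n
          (acc.1.insert n (tm.2.getD n []), tm.2)) (res, memo)).1
        = ns.foldl (fun acc n => acc.insert n (pvChainA d pm.length n)) res := by
  intro ns
  induction ns with
  | nil => intro res memo _ _; rfl
  | cons n ns ih =>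
    intro res memo hok hterm
    obtain ⟨k, hkmem, hout⟩ := hterm n (List.mem_cons_self ..)
    rw [List.mem_range] at hkmem
    obtain ⟨_, h2, h3⟩ :=
      pvProcess_spec pm d hd pm.length n k memo hok (by omega) le_rfl (by rw [hd]; exact hout)
    simp only [List.foldl_cons, h3]
    exact ih _ _ h2 (fun m hm => hterm m (List.mem_cons_of_mem _ hm))

theorem build_ancestor_map_spec : Claim_equal_build_ancestor_map := by
  intro pm all _ hpre
  unfold Spec_build_ancestor_map
  unfold build_ancestor_map build_ancestor_map_alt
  simp only
  exact (congrArg PySem.Dict.items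
    (pvFold_spec pm (PySem.Dict.ofList pm) rfl (pvNodes pm all) PySem.Dict.empty
      PySem.Dict.empty (fun x ch h => by simp [PySem.Dict.get?_empty] at h) hpre)).symm
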